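-- pv_equiv track=rewrite | github.com/xalc/knowledge-next | scripts/weread_cookie_capture.py | build_standard_cookie
-- ===== SOURCE A (Python) =====
-- def build_standard_cookie(cookie_map: dict) -> str:
--     # 优先按固定顺序输出关键字段
--     preferred_order = ["wr_vid", "wr_skey", "wr_fp", "wr_theme"]
--     ordered_pairs = []
--
--     for key in preferred_order:
--         value = cookie_map.get(key)
--         if value:
--             ordered_pairs.append(f"{key}={value}")
--
--     # 其余字段按 key 排序，避免丢信息
--     extra_keys = sorted([k for k in cookie_map.keys() if k not in preferred_order])
--     for key in extra_keys:
--         value = cookie_map.get(key)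
--         if value:
--             ordered_pairs.append(f"{key}={value}")
--
--     return "; ".join(ordered_pairs)
-- ===== SOURCE B (Python) =====
-- def build_standard_cookie(cookie_map: dict) -> str:
--     # One sorted pass: rank preferred keys by their fixed position, everything else after, alphabetically.
--     preferred_order = ["wr_vid", "wr_skey", "wr_fp", "wr_theme"]
--
--     def rank(key):
--         return (preferred_order.index(key) if key in preferred_order else len(preferred_order), key)
--
--     return "; ".join(
--         f"{key}={value}"
--         for key, value in sorted(cookie_map.items(), key=lambda kv: rank(kv[0]))
--         if value
--     )
-- ===== Notes on version B (the rewrite author's own statement) =====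
-- stated objective: alternative
-- what changed: Replaces A's two separate output loops (a fixed-order pass over the preferred keys plus a sorted pass over the remaining keys) with a single sort of all items under a composite rank key (position in the preferred list, else its length, then the key), followed by one filtered join.
import Mathlib
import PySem

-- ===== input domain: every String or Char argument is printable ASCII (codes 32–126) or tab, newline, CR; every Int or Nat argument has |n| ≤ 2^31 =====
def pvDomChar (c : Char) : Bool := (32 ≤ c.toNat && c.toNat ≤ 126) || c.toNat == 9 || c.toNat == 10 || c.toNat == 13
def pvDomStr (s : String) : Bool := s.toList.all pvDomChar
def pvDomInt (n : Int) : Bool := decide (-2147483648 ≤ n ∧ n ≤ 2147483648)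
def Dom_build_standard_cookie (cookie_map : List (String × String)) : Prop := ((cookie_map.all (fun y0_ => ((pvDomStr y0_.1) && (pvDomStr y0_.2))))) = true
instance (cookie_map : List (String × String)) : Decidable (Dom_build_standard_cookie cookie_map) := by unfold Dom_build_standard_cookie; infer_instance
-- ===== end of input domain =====

-- ===== PORT A =====
-- B replaces A's two output loops (fixed-order preferred pass + sorted-extras pass)
-- with a single sort of all items under a composite rank key; same return value.
-- Note on the Python dict argument: it is received here as its item list in insertion
-- order with unique keys via PySem.Dict.ofList (duplicate pairs: last value wins, as dict()).

def bsc_preferred : List String := ["wr_vid", "wr_skey", "wr_fp", "wr_theme"]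

-- f"{key}={value}"
def bsc_piece (key value : String) : String := key ++ "=" ++ value

def build_standard_cookie (cookie_map : List (String × String)) : String :=
  let d := PySem.Dict.ofList cookie_map
  -- the shared loop body: 'value = cookie_map.get(key); if value: ordered_pairs.append(...)'
  -- (None and "" are both falsy)
  let step : List String → String → List String := fun ordered_pairs key =>
    match d.get? key with
    | some value => if value = "" then ordered_pairs else ordered_pairs ++ [bsc_piece key value]
    | none => ordered_pairs
  let ordered₁ := bsc_preferred.foldl step []
  let extra_keys := PySem.List.sorted (d.keys.filter (fun k => !bsc_preferred.contains k)) (fun k => k)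
  let ordered_pairs := extra_keys.foldl step ordered₁
  PySem.Str.join "; " ordered_pairs

-- ===== PORT B =====
-- rank(key): (preferred_order.index(key) if key in preferred_order else len(preferred_order), key);
-- the tuple is a lexicographic sort key, hence Int ×ₗ String.
def bsc_rankInt (key : String) : Int :=
  match PySem.List.index? bsc_preferred key with
  | some i => (i : Int)
  | none => (PySem.List.len bsc_preferred : Int)

def bsc_rank (key : String) : Int ×ₗ String := toLex (bsc_rankInt key, key)

def build_standard_cookie_alt (cookie_map : List (String × String)) : String :=
  let d := PySem.Dict.ofList cookie_map
  PySem.Str.join "; "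
    (((PySem.List.sorted d.items (fun kv => bsc_rank kv.1)).filter
        (fun kv => kv.2 != "")).map (fun kv => bsc_piece kv.1 kv.2))

-- ===== PRECONDITION & SPEC =====
def Spec_build_standard_cookie (cookie_map : List (String × String)) (out : String) : Prop := out = build_standard_cookie_alt cookie_map
instance (cookie_map : List (String × String)) (out : String) : Decidable (Spec_build_standard_cookie cookie_map out) := by unfold Spec_build_standard_cookie; infer_instance

-- ===== CLAIM (what is proved, stated in full; the proofs are below) =====
def Claim_equal_build_standard_cookie : Prop := ∀ (cookie_map : List (String × String)), Dom_build_standard_cookie cookie_map → Spec_build_standard_cookie cookie_map (build_standard_cookie cookie_map)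

-- ===== LEMMAS AND PROOFS =====

-- the per-key emitted pieces, A's view (keyed lookup) and B's view (an item)
def bscA (d : PySem.Dict String String) (k : String) : List String :=
  match d.get? k with
  | some v => if v = "" then [] else [bsc_piece k v]
  | none => []

def bscB (kv : String × String) : List String :=
  if kv.2 = "" then [] else [bsc_piece kv.1 kv.2]

theorem bsc_foldl_step (d : PySem.Dict String String) (ks : List String) (acc : List String) :
    ks.foldl (fun ordered_pairs key =>
      match d.get? key with
      | some value => if value = "" then ordered_pairs else ordered_pairs ++ [bsc_piece key value]
      | none => ordered_pairs) acc = acc ++ ks.flatMap (bscA d) := by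
  induction ks generalizing acc with
  | nil => simp
  | cons k ks ih =>
    simp only [List.foldl_cons, List.flatMap_cons, ih, bscA]
    cases d.get? k with
    | none => simp
    | some v => by_cases hv : v = "" <;> simp [hv]

theorem bsc_filter_map_eq_flatMap (l : List (String × String)) :
    (l.filter (fun kv => kv.2 != "")).map (fun kv => bsc_piece kv.1 kv.2) = l.flatMap bscB := by
  induction l with
  | nil => rfl
  | cons kv l ih =>
    by_cases h : kv.2 = "" <;> simp [bscB, h, ih]

-- A's preferred pass = B's pieces over the preferred-keyed items, in preferred order
theorem bsc_pref_flatMap (d : PySem.Dict String String) (ks : List String) :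
    ks.flatMap (bscA d)
      = (ks.filterMap (fun k => (d.get? k).map (fun v => (k, v)))).flatMap bscB := by
  induction ks with
  | nil => rfl
  | cons k ks ih =>
    simp only [List.flatMap_cons, List.filterMap_cons, bscA]
    cases d.get? k with
    | none => simpa using ih
    | some v => simp [bscB, ih]

-- rank of a non-preferred key is 4 (= len(preferred_order))
theorem bsc_rankInt_of_not_mem {k : String} (h : k ∉ bsc_preferred) : bsc_rankInt k = 4 := by
  unfold bsc_rankInt
  rw [(PySem.List.index?_eq_none_iff bsc_preferred k).mpr h]
  rfl

-- rank of a preferred key is its index, < 4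
theorem bsc_rankInt_lt_of_mem {k : String} (h : k ∈ bsc_preferred) : bsc_rankInt k < 4 := by
  unfold bsc_rankInt
  rcases hi : PySem.List.index? bsc_preferred k with _ | i
  · exact absurd ((PySem.List.index?_eq_none_iff bsc_preferred k).mp hi) (by simpa using h)
  · obtain ⟨hk, -, -⟩ := PySem.List.getElem_of_index?_eq_some hi
    have h4 : i < 4 := by simpa [bsc_preferred] using hk
    show (i : Int) < 4
    exact_mod_cast h4

-- THE KEY STEP: B's single composite-rank sort is exactly
-- (preferred items in preferred order) ++ (remaining items sorted by key).
theorem bsc_sorted_decomp (d : PySem.Dict String String) (hnd : d.keys.Nodup) :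
    PySem.List.sorted d.items (fun kv => bsc_rank kv.1)
      = bsc_preferred.filterMap (fun k => (d.get? k).map (fun v => (k, v)))
        ++ (PySem.List.sorted (d.keys.filter (fun k => !bsc_preferred.contains k)) (fun k => k)).map
             (fun k => (k, d.getD k "")) := by
  set f : String → Option (String × String) := fun k => (d.get? k).map (fun v => (k, v)) with hf
  set prefPart := bsc_preferred.filterMap f with hpp
  set extras := PySem.List.sorted (d.keys.filter (fun k => !bsc_preferred.contains k)) (fun k => k) with hex
  set mex := extras.map (fun k => (k, d.getD k "")) with hmex
  have hitems : d.items.Nodup := by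
    have : (d.items.map Prod.fst).Nodup := hnd
    exact this.of_map
  have hmemf : ∀ {k : String} {kv : String × String}, f k = some kv ↔ kv.1 = k ∧ d.get? k = some kv.2 := by
    intro k kv
    simp only [hf, Option.map_eq_some_iff]
    constructor
    · rintro ⟨v, hv, rfl⟩; exact ⟨rfl, hv⟩
    · rintro ⟨h1, h2⟩; exact ⟨kv.2, h2, by rw [← h1]⟩
  have hmempp : ∀ kv : String × String, kv ∈ prefPart ↔ kv ∈ d.items ∧ bsc_preferred.contains kv.1 := by
    intro kv
    simp only [hpp, List.mem_filterMap]
    constructor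
    · rintro ⟨k, hk, hfk⟩
      obtain ⟨h1, h2⟩ := hmemf.mp hfk
      exact ⟨(PySem.Dict.get?_eq_some_iff_mem_items d kv.1 kv.2 hnd).mp (h1 ▸ h2),
        by simp [h1 ▸ hk]⟩
    · rintro ⟨h1, h2⟩
      refine ⟨kv.1, by simpa [List.contains_iff_mem] using h2, hmemf.mpr ⟨rfl, ?_⟩⟩
      exact (PySem.Dict.get?_eq_some_iff_mem_items d kv.1 kv.2 hnd).mpr h1
  have hppnd : prefPart.Nodup := by
    have hnp : bsc_preferred.Nodup := by decide
    refine hnp.filterMap ?_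
    intro a a' b hb hb'
    have h1 := (hmemf.mp hb).1
    have h2 := (hmemf.mp hb').1
    exact h1.symm.trans h2
  have hperm1 : prefPart.Perm (d.items.filter (fun kv => bsc_preferred.contains kv.1)) := by
    refine (List.perm_ext_iff_of_nodup hppnd (hitems.filter _)).mpr (fun kv => ?_)
    rw [hmempp kv, List.mem_filter]
  have hitemsmap : d.items = d.keys.map (fun k => (k, d.getD k "")) := PySem.Dict.items_eq_map_keys d hnd ""
  have hperm2 : mex.Perm (d.items.filter (fun kv => !bsc_preferred.contains kv.1)) := by
    have hp : extras.Perm (d.keys.filter (fun k => !bsc_preferred.contains k)) :=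
      PySem.List.sorted_perm _ _ false
    have : d.items.filter (fun kv => !bsc_preferred.contains kv.1)
        = (d.keys.filter (fun k => !bsc_preferred.contains k)).map (fun k => (k, d.getD k "")) := by
      rw [hitemsmap, List.filter_map]; rfl
    rw [this, hmex]
    exact hp.map _
  have hperm : (prefPart ++ mex).Perm d.items := by
    refine ((hperm1.append hperm2).trans ?_)
    exact List.filter_append_perm _ d.items
  refine PySem.List.sorted_eq_of_perm_of_pairwise_lt _ _ _ hperm ?_
  rw [List.pairwise_append]
  have hexkeys_nd : extras.Nodup :=
    ((PySem.List.sorted_perm _ _ false).nodup_iff).mpr (hnd.filter _)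
  have hexmem : ∀ k ∈ extras, k ∉ bsc_preferred := by
    intro k hk
    have := List.of_mem_filter ((PySem.List.sorted_perm _ _ false).mem_iff.mp hk)
    simpa [List.contains_iff_mem] using this
  refine ⟨?_, ?_, ?_⟩
  · -- preferred part: ranks strictly increase along preferred order
    refine List.Pairwise.filterMap f ?_ (?_ : bsc_preferred.Pairwise (fun a b => bsc_rankInt a < bsc_rankInt b))
    · intro a a' hr b hb b' hb'
      rw [(hmemf.mp hb).1, (hmemf.mp hb').1]
      exact Prod.Lex.lt_iff.mpr (Or.inl hr)
    · decide
  · -- extras part: equal rank 4, keys strictly increase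
    have hlt : extras.Pairwise (· < ·) := by
      have hle : extras.Pairwise (fun a b => a ≤ b) := PySem.List.sorted_pairwise _ _
      have hne : extras.Pairwise (· ≠ ·) := hexkeys_nd
      exact (hle.and hne).imp (fun h => lt_of_le_of_ne h.1 h.2)
    rw [List.pairwise_map]
    refine hlt.imp_of_mem (fun {a b} ha hb hab => ?_)
    refine Prod.Lex.lt_iff.mpr (Or.inr ⟨?_, hab⟩)
    show bsc_rankInt a = bsc_rankInt b
    rw [bsc_rankInt_of_not_mem (hexmem a ha), bsc_rankInt_of_not_mem (hexmem b hb)]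
  · -- every preferred item precedes every extra item
    intro a ha b hb
    obtain ⟨k, hk, hfk⟩ := List.mem_filterMap.mp ha
    obtain ⟨x, hx, rfl⟩ := List.mem_map.mp hb
    refine Prod.Lex.lt_iff.mpr (Or.inl ?_)
    show bsc_rankInt a.1 < bsc_rankInt x
    rw [(hmemf.mp hfk).1, bsc_rankInt_of_not_mem (hexmem x hx)]
    exact bsc_rankInt_lt_of_mem hk

theorem bsc_extras_flatMap (d : PySem.Dict String String) :
    ((PySem.List.sorted (d.keys.filter (fun k => !bsc_preferred.contains k)) (fun k => k)).map
        (fun k => (k, d.getD k ""))).flatMap bscB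
      = (PySem.List.sorted (d.keys.filter (fun k => !bsc_preferred.contains k)) (fun k => k)).flatMap (bscA d) := by
  rw [List.flatMap_map]
  refine List.flatMap_congr (fun k hk => ?_)
  have hkmem : k ∈ d.keys := by
    have := (PySem.List.sorted_perm (d.keys.filter (fun k => !bsc_preferred.contains k)) (fun k => k) false).mem_iff.mp hk
    exact List.mem_of_mem_filter this
  rcases hg : d.get? k with _ | v
  · exact absurd ((PySem.Dict.get?_eq_none_iff_not_mem_keys d k).mp hg) (by simpa using hkmem)
  · simp [bscA, bscB, PySem.Dict.getD, hg]

-- ===== VERDICT (by name: the statement is the Claim_ definition above) =====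
theorem build_standard_cookie_spec : Claim_equal_build_standard_cookie := by
  intro cookie_map _
  unfold Spec_build_standard_cookie build_standard_cookie build_standard_cookie_alt
  have hnd := PySem.Dict.nodup_keys_ofList (κ := String) (ν := String) cookie_map
  set d := PySem.Dict.ofList cookie_map with hd
  simp only [bsc_foldl_step, bsc_filter_map_eq_flatMap, List.nil_append,
    bsc_sorted_decomp d hnd, List.flatMap_append]
  rw [bsc_extras_flatMap d, bsc_pref_flatMap]
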